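-- pv_equiv track=rewrite | github.com/Gummy27/Prog | Project_9_World_classes/word_classes.py | word_list_into_dict
-- ===== SOURCE A (Python) =====
-- def word_list_into_dict(word_list: list) -> dict:
--     """
--         This functino takes in a word list and puts it into
--         dictionary using the word classes as keys. It also
--         finds the largest word in each group and puts it
--         into a dictionary
--     """
--     all_word_dict = {}
--     longest_word_dict = {}
--
--     for word_index in range(0, len(word_list), 2):
--         word = word_list[word_index]
--         word_class = word_list[word_index+1][0]
--         try:
--             all_word_dict[word_class].append(word)
--
--             longest_word = longest_word_dict[word_class][0]
--
--             if(len(longest_word) < len(word)):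
--                 longest_word_dict[word_class][0] = word
--
--             elif(len(longest_word) == len(word)):
--                 longest_word_dict[word_class][0] = sorted([longest_word, word])[0]
--         except:
--             all_word_dict[word_class] = [word]
--             longest_word_dict[word_class] = [word]
--
--     return all_word_dict, longest_word_dict
-- ===== SOURCE B (Python) =====
-- def word_list_into_dict(word_list: list) -> dict:
--     """Group words by the first letter of their class token, then pick each
--     group's longest word (ties: lexicographically smallest) in a second pass."""
--     all_word_dict = {}
--     for i in range(0, len(word_list), 2):
--         word = word_list[i]
--         cls = word_list[i + 1][0]
--         all_word_dict.setdefault(cls, []).append(word)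
--     longest_word_dict = {cls: [min(words, key=lambda w: (-len(w), w))]
--                          for cls, words in all_word_dict.items()}
--     return all_word_dict, longest_word_dict
-- ===== Notes on version B (the rewrite author's own statement) =====
-- stated objective: simpler
-- what changed: Replaces A's single pass with interleaved try/except running-longest tracking by a plain grouping pass followed by a per-group min(words, key=(-len, w)) comprehension for the longest words.
import Mathlib
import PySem

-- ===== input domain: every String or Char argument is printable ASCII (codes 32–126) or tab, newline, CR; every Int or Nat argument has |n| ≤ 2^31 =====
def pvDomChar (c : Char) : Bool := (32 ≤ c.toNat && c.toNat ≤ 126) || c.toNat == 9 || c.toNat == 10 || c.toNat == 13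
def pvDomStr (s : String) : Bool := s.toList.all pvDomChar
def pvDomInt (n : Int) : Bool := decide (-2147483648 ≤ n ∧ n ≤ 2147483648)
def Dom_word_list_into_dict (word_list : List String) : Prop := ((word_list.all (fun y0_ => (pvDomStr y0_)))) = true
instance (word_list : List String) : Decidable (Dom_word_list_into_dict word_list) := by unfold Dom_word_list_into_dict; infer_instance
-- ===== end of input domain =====

-- B replaces A's single pass with interleaved try/except running-longest tracking by a
-- grouping pass plus a per-group min with key (-len, word) — objective: simpler.

-- shared primitive: port of the Python expression `s[0]` (a 1-character string).
-- Exact for s ≠ "" (Pre_ guarantees this); Python raises IndexError on "".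
def pvHeadStr (s : String) : String := ((PySem.Str.pyGet? s 0).getD ' ').toString

-- ===== PORT A =====
-- body of A's loop: Python's try/except KeyError is modelled by the `contains` test
-- (both dicts always hold exactly the same keys, so the first lookup alone decides it);
-- `longest_word_dict[word_class][0] = word` rewrites the stored 1-element list, i.e. insert [word].
def wldStepA (st : PySem.Dict String (List String) × PySem.Dict String (List String))
    (word word_class : String) :
    PySem.Dict String (List String) × PySem.Dict String (List String) :=
  if st.1.contains word_class then
    -- try: all_word_dict[word_class].append(word)
    let all' := st.1.insert word_class (st.1.getD word_class [] ++ [word])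
    -- longest_word = longest_word_dict[word_class][0]
    let longest_word := PySem.List.pyGetD (st.2.getD word_class []) 0 ""
    let long' :=
      if PySem.Str.len longest_word < PySem.Str.len word then
        st.2.insert word_class [word]
      else if PySem.Str.len longest_word = PySem.Str.len word then
        st.2.insert word_class
          [PySem.List.pyGetD (PySem.List.sorted [longest_word, word] (fun x => x) false) 0 ""]
      else st.2
    (all', long')
  else
    -- except: both dicts get [word]
    (st.1.insert word_class [word], st.2.insert word_class [word])

def word_list_into_dict (word_list : List String) :
    (List (String × List String)) × (List (String × List String)) :=
  let st := (PySem.List.pyRange 0 word_list.length 2).foldl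
    (fun st word_index =>
      let word := PySem.List.pyGetD word_list word_index ""
      let word_class := pvHeadStr (PySem.List.pyGetD word_list (word_index + 1) "")
      wldStepA st word word_class)
    (PySem.Dict.empty, PySem.Dict.empty)
  (st.1.items, st.2.items)

-- ===== PORT B =====
-- min(words, key=lambda w: (-len(w), w)); words is never empty where this is used
def wldBest (ws : List String) : String :=
  (PySem.List.min2? ws (fun w => -(PySem.Str.len w)) (fun w => w)).getD ""

def word_list_into_dict_alt (word_list : List String) :
    (List (String × List String)) × (List (String × List String)) :=
  let all_word_dict := (PySem.List.pyRange 0 word_list.length 2).foldl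
    (fun d i =>
      let word := PySem.List.pyGetD word_list i ""
      let cls := pvHeadStr (PySem.List.pyGetD word_list (i + 1) "")
      -- all_word_dict.setdefault(cls, []).append(word): the default is installed,
      -- then the list bound to cls grows by word
      let d1 := d.setdefault cls []
      d1.insert cls (d1.getD cls [] ++ [word]))
    PySem.Dict.empty
  let longest_word_dict := all_word_dict.items.foldl
    (fun d p => d.insert p.1 [wldBest p.2]) PySem.Dict.empty
  (all_word_dict.items, longest_word_dict.items)

-- ===== PRECONDITION & SPEC =====
-- Pre_ excludes exactly the inputs on which the Python A raises IndexError: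
-- an odd-length list (word_list[i+1] out of range) or an empty class token (…[0]).
def Pre_word_list_into_dict (word_list : List String) : Prop :=
  word_list.length % 2 = 0 ∧
    ∀ i : Nat, i < word_list.length → i % 2 = 1 → word_list.getD i "" ≠ ""
instance (word_list : List String) : Decidable (Pre_word_list_into_dict word_list) := by
  unfold Pre_word_list_into_dict; infer_instance

def pvWitness_word_list_into_dict : List String := ["hello", "noun", "hi", "noun"]

def Spec_word_list_into_dict (word_list : List String)
    (out : (List (String × List String)) × (List (String × List String))) : Prop :=
  out = word_list_into_dict_alt word_list
instance (word_list : List String)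
    (out : (List (String × List String)) × (List (String × List String))) :
    Decidable (Spec_word_list_into_dict word_list out) := by
  unfold Spec_word_list_into_dict; infer_instance

-- ===== CLAIM (what is proved, stated in full; the proofs are below) =====
def Claim_equal_word_list_into_dict : Prop :=
  ∀ (word_list : List String), Dom_word_list_into_dict word_list →
    Pre_word_list_into_dict word_list →
    Spec_word_list_into_dict word_list (word_list_into_dict word_list)

-- ===== LEMMAS AND PROOFS =====

-- the map A's longest dict is of B's grouping dict
def wldF (p : String × List String) : String × List String := (p.1, [wldBest p.2])

-- invariant tying A's running pair of dicts to B's grouping dict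
def wldInv (dA lA : PySem.Dict String (List String)) : Prop :=
  lA.items = dA.items.map wldF ∧ (∀ p ∈ dA.items, p.2 ≠ []) ∧ dA.keys.Nodup

@[simp] theorem wldF_fst (p : String × List String) : (wldF p).1 = p.1 := rfl

theorem wld_find_map (l : List (String × List String)) (c : String) :
    List.find? (fun p => p.1 == c) (l.map wldF)
      = (List.find? (fun p => p.1 == c) l).map wldF := by
  induction l with
  | nil => rfl
  | cons p t ih =>
    simp only [List.map_cons, List.find?, wldF_fst]
    cases hb : p.1 == c
    · simpa [hb] using ih
    · rfl

theorem wld_contains_map (dA lA : PySem.Dict String (List String))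
    (h : lA.items = dA.items.map wldF) (c : String) :
    lA.contains c = dA.contains c := by
  simp [PySem.Dict.contains, h, List.any_map, Function.comp_def]

theorem wld_get?_map (dA lA : PySem.Dict String (List String))
    (h : lA.items = dA.items.map wldF) (c : String) :
    lA.get? c = (dA.get? c).map (fun ws => [wldBest ws]) := by
  simp only [PySem.Dict.get?, h, wld_find_map]
  cases List.find? (fun p => p.1 == c) dA.items with
  | none => rfl
  | some p => rfl

theorem wld_unique_val {l : List (String × List String)} {c : String}
    {v v' : List String} (hn : (l.map Prod.fst).Nodup)
    (hm : (c, v) ∈ l) (hm' : (c, v') ∈ l) : v = v' := by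
  have hk : (PySem.Dict.mk l).keys.Nodup := by
    simpa [PySem.Dict.keys] using hn
  have h1 := (PySem.Dict.get?_eq_some_iff_mem_items (PySem.Dict.mk l) c v hk).2 hm
  have h2 := (PySem.Dict.get?_eq_some_iff_mem_items (PySem.Dict.mk l) c v' hk).2 hm'
  rw [h1] at h2
  exact Option.some_inj.1 h2

theorem wld_map_replace_id {l : List (String × List String)} {c : String}
    {v : List String} (hn : (l.map Prod.fst).Nodup) (hm : (c, v) ∈ l) :
    l.map (fun p => if (p.1 == c) = true then (c, v) else p) = l := by
  conv_rhs => rw [← List.map_id l]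
  apply List.map_congr_left
  intro p hp
  by_cases h : p.1 = c
  · simp only [h, beq_self_eq_true, if_true]
    have hpe : p = (c, p.2) := by cases p; simp_all
    rw [hpe] at hp
    rw [wld_unique_val hn hm hp]
    exact hpe.symm
  · simp [h]

theorem wld_foldl_some_isSome {α : Type} (f : Option α → α → Option α)
    (hf : ∀ (m : α) (x : α), ∃ r, f (some m) x = some r) :
    ∀ (l : List α) (a : α), (l.foldl f (some a)).isSome := by
  intro l
  induction l with
  | nil => intro a; rfl
  | cons x t ih =>
    intro a
    simp only [List.foldl_cons]
    obtain ⟨r, hr⟩ := hf a x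
    rw [hr]
    exact ih r

theorem wld_min2_some {ws : List String} (h : ws ≠ []) :
    PySem.List.min2? ws (fun w => -(PySem.Str.len w)) (fun w => w)
      = some (wldBest ws) := by
  cases ws with
  | nil => exact absurd rfl h
  | cons a t =>
    have h1 : (PySem.List.min2? (a :: t) (fun w => -(PySem.Str.len w)) (fun w => w)).isSome := by
      exact wld_foldl_some_isSome _
        (fun m x => by dsimp only; split <;> exact ⟨_, rfl⟩) t a
    obtain ⟨m, hm⟩ := Option.isSome_iff_exists.1 h1
    unfold wldBest
    rw [hm]
    rfl

theorem wld_sorted_pair (a b : String) :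
    PySem.List.sorted [a, b] (fun x => x) false = if b < a then [b, a] else [a, b] := by
  by_cases h : b < a
  · rw [if_pos h]
    exact PySem.List.sorted_id_eq_of_perm_of_pairwise _ _ (List.Perm.swap a b [])
      (List.pairwise_pair.2 (le_of_lt h))
  · rw [if_neg h]
    exact PySem.List.sorted_id_eq_of_perm_of_pairwise _ _ (List.Perm.refl _)
      (List.pairwise_pair.2 (le_of_not_gt h))

theorem wld_pyGetD_singleton (x : String) : PySem.List.pyGetD [x] 0 "" = x := by
  simp [PySem.List.pyGetD, PySem.List.pyGet?, PySem.List.pyIdx?]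

-- the running-longest update of A computes exactly B's min over the grown group
theorem wld_best_append {ws : List String} (h : ws ≠ []) (w : String) :
    wldBest (ws ++ [w]) =
      if PySem.Str.len (wldBest ws) < PySem.Str.len w then w
      else if PySem.Str.len (wldBest ws) = PySem.Str.len w then
        (if w < wldBest ws then w else wldBest ws)
      else wldBest ws := by
  have hm := wld_min2_some h
  set m := wldBest ws with hmdef
  unfold wldBest
  unfold PySem.List.min2? at hm ⊢
  rw [List.foldl_append, hm]
  simp only [List.foldl_cons, List.foldl_nil]
  by_cases hA : -PySem.Str.len w < -PySem.Str.len m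
  · rw [if_pos (by simp only [Bool.or_eq_true, Bool.and_eq_true, Bool.not_eq_true', decide_eq_true_eq, decide_eq_false_iff_not]; exact Or.inl hA)]
    rw [if_pos (show PySem.Str.len m < PySem.Str.len w by omega)]
    rfl
  · by_cases hD : w < m
    · by_cases hB : -PySem.Str.len m < -PySem.Str.len w
      · rw [if_neg (by simp only [Bool.or_eq_true, Bool.and_eq_true, Bool.not_eq_true', decide_eq_true_eq, decide_eq_false_iff_not]; rintro (h | ⟨h1, h2⟩) <;> first | exact hA h | exact h1 hB)]
        rw [if_neg (show ¬ PySem.Str.len m < PySem.Str.len w by omega),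
          if_neg (show ¬ PySem.Str.len m = PySem.Str.len w by omega)]
        rfl
      · rw [if_pos (by simp only [Bool.or_eq_true, Bool.and_eq_true, Bool.not_eq_true', decide_eq_true_eq, decide_eq_false_iff_not]; exact Or.inr ⟨hB, hD⟩)]
        rw [if_neg (show ¬ PySem.Str.len m < PySem.Str.len w by omega),
          if_pos (show PySem.Str.len m = PySem.Str.len w by omega), if_pos hD]
        rfl
    · rw [if_neg (by simp only [Bool.or_eq_true, Bool.and_eq_true, Bool.not_eq_true', decide_eq_true_eq, decide_eq_false_iff_not]; rintro (h | ⟨h1, h2⟩) <;> first | exact hA h | exact hD h2)]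
      by_cases hB : -PySem.Str.len m < -PySem.Str.len w
      · rw [if_neg (show ¬ PySem.Str.len m < PySem.Str.len w by omega),
          if_neg (show ¬ PySem.Str.len m = PySem.Str.len w by omega)]
        rfl
      · rw [if_neg (show ¬ PySem.Str.len m < PySem.Str.len w by omega),
          if_pos (show PySem.Str.len m = PySem.Str.len w by omega), if_neg hD]
        rfl

theorem wld_step_ok (dA lA : PySem.Dict String (List String))
    (h : wldInv dA lA) (w c : String) :
    (wldStepA (dA, lA) w c).1 = dA.insert c (dA.getD c [] ++ [w]) ∧
      wldInv (wldStepA (dA, lA) w c).1 (wldStepA (dA, lA) w c).2 := by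
  obtain ⟨hitems, hne, hnd⟩ := h
  by_cases hc : dA.contains c = true
  · -- the try branch
    obtain ⟨ws, hws⟩ : ∃ ws, dA.get? c = some ws := by
      have hiso := PySem.Dict.contains_eq_isSome_get? dA c
      rw [hc] at hiso
      exact Option.isSome_iff_exists.1 hiso.symm
    have hwsmem : (c, ws) ∈ dA.items := PySem.Dict.mem_items_of_get?_eq_some dA hws
    have hwsne : ws ≠ [] := hne _ hwsmem
    have hgetD : dA.getD c [] = ws := by simp [PySem.Dict.getD, hws]
    have hlgetD : lA.getD c [] = [wldBest ws] := by
      simp [PySem.Dict.getD, wld_get?_map dA lA hitems, hws]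
    have hlongest :
        PySem.List.pyGetD (lA.getD c []) 0 "" = wldBest ws := by
      rw [hlgetD, wld_pyGetD_singleton]
    have hstep : wldStepA (dA, lA) w c =
        (dA.insert c (ws ++ [w]),
          if PySem.Str.len (wldBest ws) < PySem.Str.len w then lA.insert c [w]
          else if PySem.Str.len (wldBest ws) = PySem.Str.len w then
            lA.insert c
              [PySem.List.pyGetD (PySem.List.sorted [wldBest ws, w] (fun x => x) false) 0 ""]
          else lA) := by
      simp only [wldStepA, hc, if_true, hgetD, hlongest]
    have hlc : lA.contains c = true := by rw [wld_contains_map dA lA hitems]; exact hc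
    have hbest := wld_best_append hwsne w
    have hAitems := PySem.Dict.items_insert_of_contains dA (ws ++ [w]) hc
    -- items of the new A-dict, mapped through wldF
    have hmapped : ((dA.insert c (ws ++ [w])).items).map wldF
        = lA.items.map (fun q => if (q.1 == c) = true then (c, [wldBest (ws ++ [w])]) else q) := by
      rw [hAitems, hitems, List.map_map, List.map_map]
      apply List.map_congr_left
      intro p _
      by_cases hp : p.1 = c <;> simp [wldF, hp]
    rw [hstep]
    refine ⟨by rw [hgetD], ?_, ?_, ?_⟩
    · -- the items relation for the longest dict
      show (if PySem.Str.len (wldBest ws) < PySem.Str.len w then lA.insert c [w]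
          else if PySem.Str.len (wldBest ws) = PySem.Str.len w then
            lA.insert c
              [PySem.List.pyGetD (PySem.List.sorted [wldBest ws, w] (fun x => x) false) 0 ""]
          else lA).items
        = ((dA.insert c (ws ++ [w])).items).map wldF
      rw [hmapped]
      by_cases h1 : PySem.Str.len (wldBest ws) < PySem.Str.len w
      · have hb : wldBest (ws ++ [w]) = w := by rw [hbest, if_pos h1]
        rw [if_pos h1, PySem.Dict.items_insert_of_contains lA [w] hlc]
        apply List.map_congr_left
        intro q _
        by_cases hq : q.1 = c <;> simp [hq, hb]
      · by_cases h2 : PySem.Str.len (wldBest ws) = PySem.Str.len w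
        · have hb : wldBest (ws ++ [w]) = if w < wldBest ws then w else wldBest ws := by
            rw [hbest, if_neg h1, if_pos h2]
          have hsp : PySem.List.pyGetD
              (PySem.List.sorted [wldBest ws, w] (fun x => x) false) 0 ""
              = if w < wldBest ws then w else wldBest ws := by
            rw [wld_sorted_pair]
            by_cases h3 : w < wldBest ws <;>
              simp [h3, PySem.List.pyGetD, PySem.List.pyGet?, PySem.List.pyIdx?]
          rw [if_neg h1, if_pos h2, PySem.Dict.items_insert_of_contains lA _ hlc]
          apply List.map_congr_left
          intro q _
          by_cases hq : q.1 = c <;> simp [hq, hb, hsp]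
        · have hb : wldBest (ws ++ [w]) = wldBest ws := by
            rw [hbest, if_neg h1, if_neg h2]
          rw [if_neg h1, if_neg h2, hb]
          have hlnd : (lA.items.map Prod.fst).Nodup := by
            rw [hitems, List.map_map]
            have hfc : (Prod.fst ∘ wldF) = (Prod.fst : String × List String → String) := by
              funext p; rfl
            rw [hfc]; exact hnd
          have hlmem : (c, [wldBest ws]) ∈ lA.items := by
            have hg := wld_get?_map dA lA hitems c
            rw [hws] at hg
            exact PySem.Dict.mem_items_of_get?_eq_some lA hg
          exact (wld_map_replace_id hlnd hlmem).symm
    · -- values stay nonempty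
      intro p hp
      rcases (PySem.Dict.mem_items_insert ..).1 hp with h1 | h1
      · rw [h1]; simp
      · exact hne _ h1.1
    · -- keys stay unique
      exact PySem.Dict.nodup_keys_insert dA c _ hnd
  · -- the except branch
    have hc' : dA.contains c = false := by simpa using hc
    have hlc : lA.contains c = false := by rw [wld_contains_map dA lA hitems]; exact hc'
    have hgetD : dA.getD c [] = [] := PySem.Dict.getD_of_not_contains dA [] hc'
    have hstep : wldStepA (dA, lA) w c = (dA.insert c [w], lA.insert c [w]) := by
      simp [wldStepA, hc']
    rw [hstep]
    refine ⟨by rw [hgetD]; rfl, ?_, ?_, ?_⟩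
    · show (lA.insert c [w]).items = ((dA.insert c [w]).items).map wldF
      rw [PySem.Dict.items_insert_of_not_contains dA [w] hc',
        PySem.Dict.items_insert_of_not_contains lA [w] hlc, hitems]
      simp [wldF, wldBest, PySem.List.min2?]
    · intro p hp
      rcases (PySem.Dict.mem_items_insert ..).1 hp with h1 | h1
      · rw [h1]; simp
      · exact hne _ h1.1
    · exact PySem.Dict.nodup_keys_insert dA c _ hnd

-- setdefault-then-append is a plain grouped insert
theorem wld_setdefault_append (d : PySem.Dict String (List String)) (c w : String) :
    (d.setdefault c []).insert c ((d.setdefault c []).getD c [] ++ [w])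
      = d.insert c (d.getD c [] ++ [w]) := by
  by_cases hc : d.contains c = true
  · rw [PySem.Dict.setdefault_of_contains d [] hc]
  · have hc' : d.contains c = false := by simpa using hc
    rw [PySem.Dict.setdefault_of_not_contains d [] hc', PySem.Dict.getD_insert_self,
      PySem.Dict.insert_insert_self, PySem.Dict.getD_of_not_contains d [] hc']

theorem wld_fold_ok (wl : List String) (L : List Int)
    (dA lA : PySem.Dict String (List String)) (h : wldInv dA lA) :
    (L.foldl (fun st word_index =>
        let word := PySem.List.pyGetD wl word_index ""
        let word_class := pvHeadStr (PySem.List.pyGetD wl (word_index + 1) "")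
        wldStepA st word word_class) (dA, lA)).1
      = L.foldl (fun d i =>
          let word := PySem.List.pyGetD wl i ""
          let cls := pvHeadStr (PySem.List.pyGetD wl (i + 1) "")
          let d1 := d.setdefault cls []
          d1.insert cls (d1.getD cls [] ++ [word])) dA ∧
    wldInv (L.foldl (fun st word_index =>
        let word := PySem.List.pyGetD wl word_index ""
        let word_class := pvHeadStr (PySem.List.pyGetD wl (word_index + 1) "")
        wldStepA st word word_class) (dA, lA)).1
      (L.foldl (fun st word_index =>
        let word := PySem.List.pyGetD wl word_index ""
        let word_class := pvHeadStr (PySem.List.pyGetD wl (word_index + 1) "")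
        wldStepA st word word_class) (dA, lA)).2 := by
  induction L generalizing dA lA with
  | nil => exact ⟨rfl, h⟩
  | cons i t ih =>
    simp only [List.foldl_cons]
    obtain ⟨h1, h2⟩ := wld_step_ok dA lA h
      (PySem.List.pyGetD wl i "") (pvHeadStr (PySem.List.pyGetD wl (i + 1) ""))
    have hh := ih _ _ h2
    rw [Prod.mk.eta] at hh
    rw [h1] at hh
    rw [← wld_setdefault_append dA (pvHeadStr (PySem.List.pyGetD wl (i + 1) ""))
      (PySem.List.pyGetD wl i "")] at hh
    exact hh

-- ===== VERDICT (by name: the statement is the Claim_ definition above) =====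
theorem word_list_into_dict_spec : Claim_equal_word_list_into_dict := by
  intro wl _ _
  unfold Spec_word_list_into_dict word_list_into_dict word_list_into_dict_alt
  have hInv0 : wldInv PySem.Dict.empty PySem.Dict.empty :=
    ⟨rfl, fun p hp => by simp [PySem.Dict.empty] at hp, PySem.Dict.nodup_keys_empty⟩
  obtain ⟨heq, hmap, hne, hnd⟩ :=
    wld_fold_ok wl (PySem.List.pyRange 0 wl.length 2) PySem.Dict.empty PySem.Dict.empty hInv0
  dsimp only
  refine Prod.ext ?_ ?_
  · dsimp only
    rw [heq]
  · dsimp only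
    rw [← heq]
    rw [PySem.Dict.items_foldl_insert_fresh _ Prod.fst (fun p => [wldBest p.2]) PySem.Dict.empty
      (by intro a _; simp [PySem.Dict.contains, PySem.Dict.empty]) hnd]
    rw [hmap]
    simp [PySem.Dict.empty, wldF]
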